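-- pv_equiv track=rewrite | github.com/supercym/python_leetcode | 205_Isomorphic_Strings.py | string2int
-- ===== SOURCE A (Python) =====
-- def string2int(s):
--     d = {}
--     index = 0
--     sint = []
--     for c in s:
--         if c not in d.keys():
--             d[c] = index
--             sint.append(index)
--             index += 1
--         else:
--             sint.append(d[c])
--     return sint
-- ===== SOURCE B (Python) =====
-- def string2int(s):
--     # A char's first-seen code equals the number of distinct characters that
--     # appear strictly before its first occurrence.
--     return [len(set(s[:s.index(c)])) for c in s]
-- ===== Notes on version B (the rewrite author's own statement) =====
-- stated objective: simpler
-- what changed: B keeps no table at all: each character's code is computed as a per-character closed form, the number of distinct characters in the prefix before that character's first occurrence (len(set(s[:s.index(c)]))), instead of A's single loop maintaining a dict, a running counter and the output list.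
import Mathlib
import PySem

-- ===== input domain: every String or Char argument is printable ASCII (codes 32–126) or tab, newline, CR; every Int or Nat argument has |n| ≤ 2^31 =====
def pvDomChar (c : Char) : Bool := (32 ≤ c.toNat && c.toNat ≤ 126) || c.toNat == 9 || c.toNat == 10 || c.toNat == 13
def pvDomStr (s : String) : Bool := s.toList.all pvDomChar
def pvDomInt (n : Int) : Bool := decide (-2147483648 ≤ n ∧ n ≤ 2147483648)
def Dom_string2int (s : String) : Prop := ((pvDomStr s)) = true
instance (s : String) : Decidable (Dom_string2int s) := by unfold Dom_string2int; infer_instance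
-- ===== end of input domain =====

-- B keeps no table: each character's code is the number of distinct characters in the
-- prefix before its first occurrence, replacing A's fused dict+counter+output loop;
-- objective: simpler (B is not faster).

-- ===== PORT A =====
-- the loop body of A, as a named step function over the state (d, index, sint)
def string2intStep (st : PySem.Dict Char Int × Int × List Int) (c : Char) :
    PySem.Dict Char Int × Int × List Int :=
  if st.1.contains c = false then
    (st.1.insert c st.2.1, st.2.1 + 1, st.2.2 ++ [st.2.1])
  else
    -- d[c]: the key is always present in this branch, so getD's default is never used
    (st.1, st.2.1, st.2.2 ++ [st.1.getD c 0])

def string2int (s : String) : List Int :=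
  (s.toList.foldl string2intStep (PySem.Dict.empty, 0, [])).2.2

-- ===== PORT B =====
-- s.index(c): c is a single character taken from s, so it is the first index of the
-- char c (PySem.List.index?); c ∈ s, so the ValueError case (getD default) never occurs.
-- s[:k] is PySem.List.slice with bound k; len(set(...)) is (PySem.Set.ofList ...).length.
def string2int_alt (s : String) : List Int :=
  s.toList.map (fun c =>
    ((PySem.Set.ofList (PySem.List.slice s.toList none
        (some (((PySem.List.index? s.toList c).getD 0 : Nat) : Int)))).length : Int))

-- ===== PRECONDITION & SPEC =====
def Spec_string2int (s : String) (out : List Int) : Prop := out = string2int_alt s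
instance (s : String) (out : List Int) : Decidable (Spec_string2int s out) := by unfold Spec_string2int; infer_instance

-- ===== CLAIM (what is proved, stated in full; the proofs are below) =====
def Claim_equal_string2int : Prop := ∀ (s : String), Dom_string2int s → Spec_string2int s (string2int s)

-- ===== LEMMAS AND PROOFS =====

-- Set.update only appends to its first argument
lemma update_prefix {α : Type} [DecidableEq α] (l seen : List α) :
    ∃ t, PySem.Set.update seen l = seen ++ t := by
  induction l generalizing seen with
  | nil => exact ⟨[], by simp [PySem.Set.update]⟩
  | cons c l ih =>
    rw [PySem.Set.update_cons, PySem.Set.add_eq_ite]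
    by_cases hc : c ∈ seen
    · rw [if_pos hc]; exact ih seen
    · rw [if_neg hc]
      rcases ih (seen ++ [c]) with ⟨t, ht⟩
      exact ⟨c :: t, by rw [ht]; simp⟩

-- the rank of c in the first-seen order equals the number of distinct elements
-- before c's first occurrence (generalized over an already-seen duplicate-free prefix)
lemma index?_update_eq_length (c : Char) (l : List Char) :
    ∀ (seen : List Char), c ∈ l → c ∉ seen →
    PySem.List.index? (PySem.Set.update seen l) c
      = some (PySem.Set.update seen (l.take ((PySem.List.index? l c).getD 0))).length := by
  induction l with
  | nil => intro _ h; exact absurd h (by simp)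
  | cons x l ih =>
    intro seen hmem hns
    by_cases hx : x = c
    · subst hx
      rw [PySem.List.index?_cons_self]
      simp only [Option.getD_some, List.take_zero]
      rw [PySem.Set.update_cons, PySem.Set.add_of_not_mem hns, PySem.Set.update_nil]
      rcases update_prefix l (seen ++ [x]) with ⟨t, ht⟩
      rw [ht, PySem.List.index?_append_of_mem t (by simp),
        PySem.List.index?_append_singleton_self seen x hns]
    · have hx' : x ≠ c := hx
      have hct : c ∈ l := (List.mem_cons.mp hmem).resolve_left (fun h => hx h.symm)
      obtain ⟨k, hk⟩ : ∃ k, PySem.List.index? l c = some k := by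
        rw [← Option.isSome_iff_exists, PySem.List.index?_isSome_iff]; exact hct
      rw [PySem.List.index?_cons_of_ne l hx', hk]
      simp only [Option.map_some, Option.getD_some, List.take_succ_cons]
      rw [PySem.Set.update_cons, PySem.Set.update_cons]
      by_cases hxs : x ∈ seen
      · rw [PySem.Set.add_of_mem hxs]
        have := ih seen hct hns
        rw [hk] at this
        simpa using this
      · rw [PySem.Set.add_of_not_mem hxs]
        have hns' : c ∉ seen ++ [x] := by simp [hns, Ne.symm hx']
        have := ih (seen ++ [x]) hct hns'
        rw [hk] at this
        simpa using this

-- main loop invariant for A: fold from a state whose dict holds the ranks of the seen prefix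
lemma loopA_eq (l : List Char) : ∀ (seen : List Char) (d : PySem.Dict Char Int) (sint : List Int),
    (∀ c, d.get? c = (PySem.List.index? seen c).map (fun n => (n : Int))) →
    (l.foldl string2intStep (d, (seen.length : Int), sint)).2.2
      = sint ++ l.map (fun c =>
          (((PySem.List.index? (PySem.Set.update seen l) c).getD 0 : Nat) : Int)) := by
  induction l with
  | nil => intro seen d sint _; simp [PySem.Set.update]
  | cons c l ih =>
    intro seen d sint hd
    by_cases hc : c ∈ seen
    · -- else branch: c already seen
      obtain ⟨k, hk⟩ : ∃ k, PySem.List.index? seen c = some k := by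
        rw [← Option.isSome_iff_exists, PySem.List.index?_isSome_iff]; exact hc
      have hct : d.contains c = true := by
        rw [PySem.Dict.contains_eq_isSome_get?, hd c, hk]; rfl
      have hstep : string2intStep (d, (seen.length : Int), sint) c
          = (d, (seen.length : Int), sint ++ [(k : Int)]) := by
        have hval : d.getD c 0 = (k : Int) := by
          rw [PySem.Dict.getD_eq_get?_getD, hd c, hk]; rfl
        simp [string2intStep, hct, hval]
      have hupd : PySem.Set.update seen (c :: l) = PySem.Set.update seen l := by
        rw [PySem.Set.update_cons, PySem.Set.add_of_mem hc]
      rw [hupd, List.foldl_cons, hstep, ih seen d _ hd]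
      simp only [List.map_cons]
      have hidx : PySem.List.index? (PySem.Set.update seen l) c = some k := by
        rcases update_prefix l seen with ⟨t, ht⟩
        rw [ht, PySem.List.index?_append_of_mem t hc, hk]
      rw [hidx]
      simp
    · -- if branch: c is new
      have hnone : PySem.List.index? seen c = none :=
        (PySem.List.index?_eq_none_iff seen c).mpr hc
      have hcf : d.contains c = false := by
        rw [PySem.Dict.contains_eq_isSome_get?, hd c, hnone]; rfl
      have hstep : string2intStep (d, (seen.length : Int), sint) c
          = (d.insert c (seen.length : Int), (seen.length : Int) + 1,
             sint ++ [(seen.length : Int)]) := by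
        simp [string2intStep, hcf]
      have hd' : ∀ c', (d.insert c (seen.length : Int)).get? c'
          = (PySem.List.index? (seen ++ [c]) c').map (fun n => (n : Int)) := by
        intro c'
        by_cases hcc : c' = c
        · subst hcc
          rw [PySem.Dict.get?_insert_self, PySem.List.index?_append_singleton_self seen c' hc]
          rfl
        · rw [PySem.Dict.get?_insert_of_ne d _ hcc, hd c']
          by_cases h1 : c' ∈ seen
          · rw [PySem.List.index?_append_of_mem [c] h1]
          · rw [(PySem.List.index?_eq_none_iff seen c').mpr h1,
              (PySem.List.index?_eq_none_iff (seen ++ [c]) c').mpr (by simp [h1, hcc])]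
      have hlen : (seen.length : Int) + 1 = (((seen ++ [c]).length : Nat) : Int) := by
        simp
      have hupd : PySem.Set.update seen (c :: l) = PySem.Set.update (seen ++ [c]) l := by
        rw [PySem.Set.update_cons, PySem.Set.add_of_not_mem hc]
      rw [hupd, List.foldl_cons, hstep, hlen, ih (seen ++ [c]) _ _ hd']
      simp only [List.map_cons]
      have hidx : PySem.List.index? (PySem.Set.update (seen ++ [c]) l) c = some seen.length := by
        rcases update_prefix l (seen ++ [c]) with ⟨t, ht⟩
        rw [ht, PySem.List.index?_append_of_mem t (by simp),
          PySem.List.index?_append_singleton_self seen c hc]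
      rw [hidx]
      simp

-- ===== VERDICT (by name: the statement is the Claim_ definition above) =====
theorem string2int_spec : Claim_equal_string2int := by
  intro s _
  unfold Spec_string2int string2int string2int_alt
  have h := loopA_eq s.toList [] PySem.Dict.empty []
    (by intro c; rw [PySem.Dict.get?_empty,
          (PySem.List.index?_eq_none_iff [] c).mpr (by simp)]; rfl)
  simp only [List.length_nil, Nat.cast_zero] at h
  rw [h, PySem.Set.update_nil_left]
  simp only [List.nil_append]
  apply List.map_congr_left
  intro c hc
  have hkey := index?_update_eq_length c s.toList [] hc (by simp)
  rw [PySem.Set.update_nil_left] at hkey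
  rw [PySem.List.slice_to_natCast, hkey]
  simp [PySem.Set.update_nil_left]
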